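-- pv_equiv track=rewrite | github.com/lilian-hunt/solovay-kitaev | utils.py | cleanup_recursive
-- ===== SOURCE A (Python) =====
-- def cleanup_recursive(string):
--   """
--   Gates that reduce
--     HH -> XX -> YY -> ZZ -> Tt -> tT -> Ss -> sS -> I
--     TT -> S
--     SS -> Z
--     HZH -> X
--     HXH -> Z
--     XY -> Z
--     YZ -> X
--     ZX -> Y
--   """
--   replace_pairs = (
--     ("HH", ""),
--     ("XX", ""),
--     ("ZZ", ""),
--     ("YY", ""),
--     ("sS", ""),
--     ("Ss", ""),
--     ("tT", ""),
--     ("Tt", ""),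
--     ("TT", "S"),
--     ("SSSS", ""),
--     ("HXH", "Z"),
--     ("HZH", "X"),
--   )
--
--   # For hermitian matrices replace dagger with the original
--   cleaned_string = string.replace("x", "X").replace("y", "Y").replace("z", "Z").replace("h", "H")
--
--   # Remove all the identity matrices
--   cleaned_string = cleaned_string.replace("I", "").replace("i", "")
--
--   for pair in replace_pairs:
--     cleaned_string = cleaned_string.replace(pair[0], pair[1])
--
--   if string != cleaned_string:
--     return cleanup_recursive(cleaned_string)
--   return cleaned_string
-- ===== SOURCE B (Python) =====
-- # Single char-level normalization pass (case-fix + identity removal) done ONCE up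
-- # front, then an iterative fixpoint loop over only the 12 reduction pairs; safe
-- # because no reduction rule reintroduces a normalizable character.
-- _TABLE = {"x": "X", "y": "Y", "z": "Z", "h": "H", "I": "", "i": ""}
-- _PAIRS = (
--     ("HH", ""), ("XX", ""), ("ZZ", ""), ("YY", ""),
--     ("sS", ""), ("Ss", ""), ("tT", ""), ("Tt", ""),
--     ("TT", "S"), ("SSSS", ""), ("HXH", "Z"), ("HZH", "X"),
-- )
--
--
-- def cleanup_recursive(string):
--     s = "".join(_TABLE.get(c, c) for c in string)
--     while True:
--         t = s
--         for old, new in _PAIRS: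
--             t = t.replace(old, new)
--         if t == s:
--             return s
--         s = t
-- ===== Notes on version B (the rewrite author's own statement) =====
-- stated objective: alternative
-- what changed: B hoists the case-normalization and I/i removal out of the fixpoint entirely, doing it in ONE char-level pass (a per-character table map), and then iterates only the 12 reduction-pair substitutions in a while-True loop, instead of A's tail recursion that re-runs the six normalization replaces on every pass; correct because no reduction rule reintroduces a normalizable character.
import Mathlib
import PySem

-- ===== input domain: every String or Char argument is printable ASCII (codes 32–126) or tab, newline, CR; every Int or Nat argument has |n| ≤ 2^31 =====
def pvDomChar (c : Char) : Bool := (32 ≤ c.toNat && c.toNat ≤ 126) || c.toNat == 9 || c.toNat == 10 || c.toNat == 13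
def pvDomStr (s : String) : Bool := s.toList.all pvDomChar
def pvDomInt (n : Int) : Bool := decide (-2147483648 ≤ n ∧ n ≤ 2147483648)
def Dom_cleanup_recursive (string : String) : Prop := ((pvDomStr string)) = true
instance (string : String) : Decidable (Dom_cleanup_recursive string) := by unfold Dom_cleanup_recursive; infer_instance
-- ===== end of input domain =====

-- B does the case-fix / identity removal in ONE char-level pass up front (no rule
-- reintroduces a normalizable character), then an iterative fixpoint loop over only
-- the 12 reduction pairs (alternative decomposition; same result).

-- ===== PORT A =====
-- fuel recursion transliterating A's self-recursion; the fuel bound `2*len+2` is a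
-- guard only (every changing pass after the first strictly shortens the string), so
-- the 0-fuel branch is unreachable.
def cleanup_recursive_go : Nat → String → String
  | 0, s => s
  | fuel+1, string =>
    -- replace_pairs, kept in A's order
    let replace_pairs : List (String × String) :=
      [("HH", ""), ("XX", ""), ("ZZ", ""), ("YY", ""),
       ("sS", ""), ("Ss", ""), ("tT", ""), ("Tt", ""),
       ("TT", "S"), ("SSSS", ""), ("HXH", "Z"), ("HZH", "X")]
    let cleaned_string :=
      PySem.Str.replace (PySem.Str.replace (PySem.Str.replace (PySem.Str.replace string "x" "X") "y" "Y") "z" "Z") "h" "H"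
    let cleaned_string := PySem.Str.replace (PySem.Str.replace cleaned_string "I" "") "i" ""
    let cleaned_string :=
      replace_pairs.foldl (fun acc pair => PySem.Str.replace acc pair.1 pair.2) cleaned_string
    if string ≠ cleaned_string then cleanup_recursive_go fuel cleaned_string
    else cleaned_string

def cleanup_recursive (string : String) : String :=
  cleanup_recursive_go (2 * string.length + 2) string

-- ===== PORT B =====
-- _TABLE.get(c, c) of Source B, the per-character normalization (a char maps to 0 or 1 chars)
def pvNormChar (c : Char) : List Char :=
  if c = 'x' then ['X'] else if c = 'y' then ['Y'] else if c = 'z' then ['Z']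
  else if c = 'h' then ['H'] else if c = 'I' then [] else if c = 'i' then [] else [c]

-- _PAIRS of Source B, at the List Char level
def pvPairs : List (List Char × List Char) :=
  [(['H','H'], []), (['X','X'], []), (['Z','Z'], []), (['Y','Y'], []),
   (['s','S'], []), (['S','s'], []), (['t','T'], []), (['T','t'], []),
   (['T','T'], ['S']), (['S','S','S','S'], []), (['H','X','H'], ['Z']), (['H','Z','H'], ['X'])]

-- Source B's `while True` fixpoint loop over the reduction pairs, as a fuel loop; the
-- fuel `2*len+2` is a never-reached guard (each changing pass strictly shortens)
def cleanup_recursive_alt_loop : Nat → List Char → List Char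
  | 0, s => s
  | fuel+1, s =>
    let t := pvPairs.foldl (fun t r => PySem.Chars.replace t r.1 r.2) s
    if t = s then s else cleanup_recursive_alt_loop fuel t

def cleanup_recursive_alt (string : String) : String :=
  String.ofList
    (cleanup_recursive_alt_loop (2 * string.toList.length + 2)
      (string.toList.flatMap pvNormChar))

-- ===== PRECONDITION & SPEC =====
def Spec_cleanup_recursive (string : String) (out : String) : Prop := out = cleanup_recursive_alt string
instance (string : String) (out : String) : Decidable (Spec_cleanup_recursive string out) := by unfold Spec_cleanup_recursive; infer_instance

-- ===== CLAIM (what is proved, stated in full; the proofs are below) =====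
def Claim_equal_cleanup_recursive : Prop := ∀ (string : String), Dom_cleanup_recursive string → Spec_cleanup_recursive string (cleanup_recursive string)

-- ===== LEMMAS AND PROOFS =====

-- list-level images of A's two stages
def pvNormList (cs : List Char) : List Char :=
  PySem.Chars.replace (PySem.Chars.replace (PySem.Chars.replace (PySem.Chars.replace (PySem.Chars.replace (PySem.Chars.replace cs ['x'] ['X']) ['y'] ['Y']) ['z'] ['Z']) ['h'] ['H']) ['I'] []) ['i'] []

def pvReduce (cs : List Char) : List Char :=
  pvPairs.foldl (fun t r => PySem.Chars.replace t r.1 r.2) cs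

-- list-level image of A's recursion body
def pvGoA : Nat → List Char → List Char
  | 0, s => s
  | fuel+1, s =>
    let c := pvReduce (pvNormList s)
    if s ≠ c then pvGoA fuel c else c

-- a char is already normalized
abbrev pvOK (c : Char) : Prop :=
  c ≠ 'x' ∧ c ≠ 'y' ∧ c ≠ 'z' ∧ c ≠ 'h' ∧ c ≠ 'I' ∧ c ≠ 'i'

-- string literals used by A, on the list side
theorem pv_tl_0 : ("" : String).toList = [] := by rfl
theorem pv_tl_1 : ("H" : String).toList = ['H'] := by rfl
theorem pv_tl_2 : ("HH" : String).toList = ['H', 'H'] := by rfl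
theorem pv_tl_3 : ("HXH" : String).toList = ['H', 'X', 'H'] := by rfl
theorem pv_tl_4 : ("HZH" : String).toList = ['H', 'Z', 'H'] := by rfl
theorem pv_tl_5 : ("I" : String).toList = ['I'] := by rfl
theorem pv_tl_6 : ("S" : String).toList = ['S'] := by rfl
theorem pv_tl_7 : ("SSSS" : String).toList = ['S', 'S', 'S', 'S'] := by rfl
theorem pv_tl_8 : ("Ss" : String).toList = ['S', 's'] := by rfl
theorem pv_tl_9 : ("TT" : String).toList = ['T', 'T'] := by rfl
theorem pv_tl_10 : ("Tt" : String).toList = ['T', 't'] := by rfl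
theorem pv_tl_11 : ("X" : String).toList = ['X'] := by rfl
theorem pv_tl_12 : ("XX" : String).toList = ['X', 'X'] := by rfl
theorem pv_tl_13 : ("Y" : String).toList = ['Y'] := by rfl
theorem pv_tl_14 : ("YY" : String).toList = ['Y', 'Y'] := by rfl
theorem pv_tl_15 : ("Z" : String).toList = ['Z'] := by rfl
theorem pv_tl_16 : ("ZZ" : String).toList = ['Z', 'Z'] := by rfl
theorem pv_tl_17 : ("h" : String).toList = ['h'] := by rfl
theorem pv_tl_18 : ("i" : String).toList = ['i'] := by rfl
theorem pv_tl_19 : ("sS" : String).toList = ['s', 'S'] := by rfl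
theorem pv_tl_20 : ("tT" : String).toList = ['t', 'T'] := by rfl
theorem pv_tl_21 : ("x" : String).toList = ['x'] := by rfl
theorem pv_tl_22 : ("y" : String).toList = ['y'] := by rfl
theorem pv_tl_23 : ("z" : String).toList = ['z'] := by rfl

-- structural equations of Chars.replace.go
theorem pv_go_zero (old new l acc : List Char) :
    PySem.Chars.replace.go old new 0 l acc = acc.reverse ++ l := by
  cases l <;> simp [PySem.Chars.replace.go]

theorem pv_go_nil (old new acc : List Char) (fuel : Nat) :
    PySem.Chars.replace.go old new fuel [] acc = acc.reverse := by
  cases fuel <;> simp [PySem.Chars.replace.go]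

theorem pv_go_cons (old new l acc : List Char) (c : Char) (fuel : Nat) :
    PySem.Chars.replace.go old new (fuel+1) (c :: l) acc =
      if old.isPrefixOf (c :: l) then
        PySem.Chars.replace.go old new fuel (List.drop old.length (c :: l)) (new.reverse ++ acc)
      else PySem.Chars.replace.go old new fuel l (c :: acc) := by
  simp [PySem.Chars.replace.go]

-- replacing a single character is a flatMap
def pvRep1 (a : Char) (new : List Char) : Char → List Char :=
  fun c => if c = a then new else [c]

theorem pv_go_single (a : Char) (new : List Char) :
    ∀ (fuel : Nat) (l acc : List Char), l.length ≤ fuel →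
      PySem.Chars.replace.go [a] new fuel l acc = acc.reverse ++ l.flatMap (pvRep1 a new) := by
  intro fuel
  induction fuel with
  | zero =>
    intro l acc h
    have hl : l = [] := List.eq_nil_of_length_eq_zero (Nat.le_zero.mp h)
    subst hl; simp [pv_go_zero]
  | succ n ih =>
    intro l acc h
    cases l with
    | nil => simp [pv_go_nil]
    | cons c t =>
      rw [pv_go_cons]
      by_cases hc : c = a
      · subst hc
        rw [if_pos (by simp [List.isPrefixOf])]
        simp only [List.length_cons] at h
        rw [show List.drop [c].length (c :: t) = t by simp,
            ih t (new.reverse ++ acc) (Nat.le_of_succ_le_succ h)]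
        simp [pvRep1]
      · rw [if_neg (by simp [List.isPrefixOf, Ne.symm hc]),
            ih t (c :: acc) (by simpa using Nat.le_of_succ_le_succ (by simpa using h))]
        simp [pvRep1, hc]

theorem pv_replace_single (a : Char) (new cs : List Char) :
    PySem.Chars.replace cs [a] new = cs.flatMap (pvRep1 a new) := by
  rw [PySem.Chars.replace]
  simp only [List.isEmpty_cons, Bool.false_eq_true, if_false]
  simpa using pv_go_single a new cs.length cs [] le_rfl

-- replace only produces characters of the input or of `new`
theorem pv_go_allP (p : Char → Prop) (old new : List Char) (hnew : ∀ x ∈ new, p x) :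
    ∀ (fuel : Nat) (l acc : List Char), (∀ x ∈ l, p x) → (∀ x ∈ acc, p x) →
      ∀ x ∈ PySem.Chars.replace.go old new fuel l acc, p x := by
  intro fuel
  induction fuel with
  | zero =>
    intro l acc hl hacc x hx
    rw [pv_go_zero] at hx
    rcases List.mem_append.mp hx with h | h
    · exact hacc x (List.mem_reverse.mp h)
    · exact hl x h
  | succ n ih =>
    intro l acc hl hacc x hx
    cases l with
    | nil =>
      rw [pv_go_nil] at hx
      exact hacc x (List.mem_reverse.mp hx)
    | cons c t =>
      rw [pv_go_cons] at hx
      split_ifs at hx with hpre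
      · refine ih _ _ (fun y hy => hl y (List.mem_of_mem_drop hy)) (fun y hy => ?_) x hx
        rcases List.mem_append.mp hy with h | h
        · exact hnew y (List.mem_reverse.mp h)
        · exact hacc y h
      · refine ih _ _ (fun y hy => hl y (List.mem_cons_of_mem _ hy)) (fun y hy => ?_) x hx
        rcases List.mem_cons.mp hy with h | h
        · exact h ▸ hl c List.mem_cons_self
        · exact hacc y h

theorem pv_replace_allP (p : Char → Prop) (cs old new : List Char)
    (hcs : ∀ x ∈ cs, p x) (hnew : ∀ x ∈ new, p x) :
    ∀ x ∈ PySem.Chars.replace cs old new, p x := by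
  rw [PySem.Chars.replace]
  split_ifs with h
  · intro x hx
    rcases List.mem_append.mp hx with hm | hm
    · exact hnew x hm
    · rcases List.mem_flatMap.mp hm with ⟨c, hc, hcm⟩
      rcases List.mem_cons.mp hcm with h' | h'
      · exact h' ▸ hcs c hc
      · exact hnew x h'
  · exact pv_go_allP p old new hnew cs.length cs [] hcs (by simp)

theorem pv_foldl_allP (p : Char → Prop) :
    ∀ (ps : List (List Char × List Char)), (∀ q ∈ ps, ∀ x ∈ q.2, p x) →
      ∀ cs, (∀ x ∈ cs, p x) →
        ∀ x ∈ ps.foldl (fun t r => PySem.Chars.replace t r.1 r.2) cs, p x := by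
  intro ps
  induction ps with
  | nil => intro _ cs hcs; simpa using hcs
  | cons q ps ih =>
    intro hq cs hcs
    rw [List.foldl_cons]
    exact ih (fun r hr => hq r (List.mem_cons_of_mem _ hr)) _
      (pv_replace_allP p cs q.1 q.2 hcs (hq q List.mem_cons_self))

-- A's normalization chain IS B's one-pass flatMap
theorem pv_chain_eq (cs : List Char) : pvNormList cs = cs.flatMap pvNormChar := by
  unfold pvNormList
  rw [pv_replace_single, pv_replace_single, pv_replace_single, pv_replace_single,
      pv_replace_single, pv_replace_single]
  simp only [List.flatMap_assoc]
  congr 1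
  funext c
  by_cases hx : c = 'x'; · subst hx; rfl
  by_cases hy : c = 'y'; · subst hy; rfl
  by_cases hz : c = 'z'; · subst hz; rfl
  by_cases hh : c = 'h'; · subst hh; rfl
  by_cases hI : c = 'I'; · subst hI; rfl
  by_cases hi : c = 'i'; · subst hi; rfl
  simp [pvRep1, pvNormChar, hx, hy, hz, hh, hI, hi]

theorem pv_normChar_ok (c : Char) : ∀ x ∈ pvNormChar c, pvOK x := by
  intro x hx
  unfold pvNormChar at hx
  split_ifs at hx with h1 h2 h3 h4 h5 h6 <;>
    simp only [List.mem_singleton, List.not_mem_nil] at hx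
  · subst hx; decide
  · subst hx; decide
  · subst hx; decide
  · subst hx; decide
  · subst hx; exact ⟨h1, h2, h3, h4, h5, h6⟩

theorem pv_norm_all (cs : List Char) : ∀ x ∈ cs.flatMap pvNormChar, pvOK x := by
  intro x hx
  rcases List.mem_flatMap.mp hx with ⟨c, _, hcm⟩
  exact pv_normChar_ok c x hcm

theorem pv_normChar_id (c : Char) (h : pvOK c) : pvNormChar c = [c] := by
  obtain ⟨h1, h2, h3, h4, h5, h6⟩ := h
  simp [pvNormChar, h1, h2, h3, h4, h5, h6]

theorem pv_flatMap_id (cs : List Char) (h : ∀ x ∈ cs, pvOK x) :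
    cs.flatMap pvNormChar = cs := by
  induction cs with
  | nil => rfl
  | cons c t ih =>
    rw [List.flatMap_cons, pv_normChar_id c (h c List.mem_cons_self),
        ih (fun x hx => h x (List.mem_cons_of_mem _ hx))]
    rfl

theorem pv_norm_id (cs : List Char) (h : ∀ x ∈ cs, pvOK x) : pvNormList cs = cs := by
  rw [pv_chain_eq, pv_flatMap_id cs h]

theorem pv_pairs_ok : ∀ q ∈ pvPairs, ∀ x ∈ q.2, pvOK x := by
  intro q hq x hx
  fin_cases hq <;> simp only [List.mem_singleton, List.not_mem_nil] at hx <;>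
    subst hx <;> decide

theorem pv_reduce_ok (cs : List Char) (h : ∀ x ∈ cs, pvOK x) :
    ∀ x ∈ pvReduce cs, pvOK x :=
  pv_foldl_allP pvOK pvPairs pv_pairs_ok cs h

-- loop equations
theorem pv_goA_succ (n : Nat) (s : List Char) :
    pvGoA (n+1) s =
      if s ≠ pvReduce (pvNormList s) then pvGoA n (pvReduce (pvNormList s))
      else pvReduce (pvNormList s) := by
  simp only [pvGoA]

theorem pv_loop_succ (n : Nat) (s : List Char) :
    cleanup_recursive_alt_loop (n+1) s =
      if pvReduce s = s then s else cleanup_recursive_alt_loop n (pvReduce s) := by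
  simp only [cleanup_recursive_alt_loop, pvReduce]

-- on normalized input, A's per-pass body and B's loop coincide
theorem pv_loop_eq (n : Nat) : ∀ cs, (∀ x ∈ cs, pvOK x) →
    pvGoA n cs = cleanup_recursive_alt_loop n cs := by
  induction n with
  | zero => intro cs _; rfl
  | succ n ih =>
    intro cs h
    rw [pv_goA_succ, pv_loop_succ, pv_norm_id cs h]
    by_cases hc : pvReduce cs = cs
    · simp [hc]
    · rw [if_pos (Ne.symm hc), if_neg hc]
      exact ih _ (pv_reduce_ok cs h)

-- A's recursion at the list level equals B's normalize-then-loop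
theorem pv_main (cs : List Char) :
    pvGoA (2 * cs.length + 2) cs =
      cleanup_recursive_alt_loop (2 * cs.length + 2) (cs.flatMap pvNormChar) := by
  by_cases h : ∀ x ∈ cs, pvOK x
  · rw [pv_flatMap_id cs h]; exact pv_loop_eq _ cs h
  · have ht : ∀ x ∈ cs.flatMap pvNormChar, pvOK x := pv_norm_all cs
    have hr : ∀ x ∈ pvReduce (cs.flatMap pvNormChar), pvOK x :=
      pv_reduce_ok _ ht
    have hne : cs ≠ pvReduce (cs.flatMap pvNormChar) := by
      intro he; exact h (he ▸ hr)
    show pvGoA (2 * cs.length + 1 + 1) cs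
        = cleanup_recursive_alt_loop (2 * cs.length + 1 + 1) (cs.flatMap pvNormChar)
    rw [pv_goA_succ, pv_chain_eq, if_pos hne, pv_loop_succ]
    by_cases hrt : pvReduce (cs.flatMap pvNormChar) = cs.flatMap pvNormChar
    · rw [if_pos hrt, pv_loop_eq _ _ hr, hrt, pv_loop_succ, if_pos hrt]
    · rw [if_neg hrt, pv_loop_eq _ _ hr]

-- the cleaned string of A's body, moved to the list side
theorem pv_cleanedStr (s : String) :
    ((PySem.Str.replace (PySem.Str.replace (PySem.Str.replace (PySem.Str.replace (PySem.Str.replace (PySem.Str.replace (PySem.Str.replace (PySem.Str.replace (PySem.Str.replace (PySem.Str.replace (PySem.Str.replace (PySem.Str.replace (PySem.Str.replace (PySem.Str.replace (PySem.Str.replace (PySem.Str.replace (PySem.Str.replace (PySem.Str.replace s "x" "X") "y" "Y") "z" "Z") "h" "H") "I" "") "i" "") "HH" "") "XX" "") "ZZ" "") "YY" "") "sS" "") "Ss" "") "tT" "") "Tt" "") "TT" "S") "SSSS" "") "HXH" "Z") "HZH" "X")).toList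
      = pvReduce (pvNormList s.toList) := by
  simp only [pvReduce, pvNormList, pvPairs, List.foldl_cons, List.foldl_nil,
    PySem.Str.toList_replace, pv_tl_0, pv_tl_1, pv_tl_2, pv_tl_3, pv_tl_4, pv_tl_5,
    pv_tl_6, pv_tl_7, pv_tl_8, pv_tl_9, pv_tl_10, pv_tl_11, pv_tl_12, pv_tl_13,
    pv_tl_14, pv_tl_15, pv_tl_16, pv_tl_17, pv_tl_18, pv_tl_19, pv_tl_20, pv_tl_21,
    pv_tl_22, pv_tl_23]

-- bridge: A's String port is the list-level recursion
theorem pv_bridge (n : Nat) : ∀ s : String,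
    cleanup_recursive_go n s = String.ofList (pvGoA n s.toList) := by
  induction n with
  | zero => intro s; simp [cleanup_recursive_go, pvGoA]
  | succ n ih =>
    intro s
    simp only [cleanup_recursive_go, List.foldl_cons, List.foldl_nil, pv_goA_succ]
    split_ifs with h1 h2 h3
    · rw [ih, pv_cleanedStr s]
    · exact absurd (String.toList_inj.mp (by rw [pv_cleanedStr s]; exact not_not.mp h2)) h1
    · exact absurd (by rw [← pv_cleanedStr s]; exact String.toList_inj.mpr (not_not.mp h1)) h3
    · rw [← pv_cleanedStr s, String.ofList_toList]

-- ===== VERDICT (by name: the statement is the Claim_ definition above) =====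
theorem cleanup_recursive_spec : Claim_equal_cleanup_recursive := by
  intro s _
  unfold Spec_cleanup_recursive cleanup_recursive cleanup_recursive_alt
  rw [pv_bridge]
  have hlen : s.length = s.toList.length := by simp
  rw [hlen, pv_main s.toList]
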